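-- pv_equiv track=rewrite | github.com/KAANVOLKAN05/fluidicLib_volk | stringHelpers.py | makeSeparator
-- ===== SOURCE A (Python) =====
-- def makeSeparator(padLength:int, numLines:int, anchorIndex:int, separatorChars:list = [" ", "-", "|"]):
-- 	separator = ""
-- 	pad0 = " "*padLength
-- 	# separator = pad0 + (" \n"*(s1[2]-1)) +
-- 	# for i in range(s1[1]):
-- 	for i in range(numLines):
-- 		if i < anchorIndex:
-- 			separator =  separator + pad0 + separatorChars[0]
-- 		elif i == anchorIndex:
-- 			separator =  separator + pad0 + separatorChars[1]
-- 		else: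
-- 			separator =  separator + pad0 + separatorChars[2]
-- 		if i < (numLines - 1):
-- 			separator =  separator + "\n"
-- 	return separator
-- ===== SOURCE B (Python) =====
-- def makeSeparator(padLength: int, numLines: int, anchorIndex: int, separatorChars: list = [" ", "-", "|"]):
--     # Closed-form block construction: count lines before/at/after the anchor,
--     # build the three blocks directly and join them with newlines.
--     pad0 = " " * padLength
--     before = max(0, min(numLines, anchorIndex))
--     hasAnchor = 0 <= anchorIndex < numLines
--     after = numLines - before - (1 if hasAnchor else 0)
--     lines = []
--     if before > 0:
--         lines.extend([pad0 + separatorChars[0]] * before)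
--     if hasAnchor:
--         lines.append(pad0 + separatorChars[1])
--     if after > 0:
--         lines.extend([pad0 + separatorChars[2]] * after)
--     return "\n".join(lines)
-- ===== Notes on version B (the rewrite author's own statement) =====
-- stated objective: faster
-- what changed: Replaces the per-line loop with its index comparisons and incremental string accumulation by closed-form block counts (lines before / at / after the anchor), building the line list as three blocks and joining once with newlines.
import Mathlib
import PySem

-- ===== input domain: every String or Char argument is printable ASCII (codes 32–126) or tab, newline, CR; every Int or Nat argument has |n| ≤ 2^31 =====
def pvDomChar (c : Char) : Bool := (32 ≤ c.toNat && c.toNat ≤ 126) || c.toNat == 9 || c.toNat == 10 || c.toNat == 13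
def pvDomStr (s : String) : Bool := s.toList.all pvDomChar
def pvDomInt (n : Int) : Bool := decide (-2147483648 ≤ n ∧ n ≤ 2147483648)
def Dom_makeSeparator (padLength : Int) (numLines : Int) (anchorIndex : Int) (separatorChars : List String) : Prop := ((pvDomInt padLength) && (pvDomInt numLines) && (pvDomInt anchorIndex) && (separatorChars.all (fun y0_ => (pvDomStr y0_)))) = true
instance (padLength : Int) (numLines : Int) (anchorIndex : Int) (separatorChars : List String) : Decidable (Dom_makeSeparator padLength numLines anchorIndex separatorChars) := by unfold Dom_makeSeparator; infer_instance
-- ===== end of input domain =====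

-- B replaces A's per-line loop (with index comparisons and string accumulation) by closed-form
-- block counts before/at/after the anchor, building the line list in three blocks and joining once.

-- ===== PORT A =====
def makeSeparator (padLength : Int) (numLines : Int) (anchorIndex : Int) (separatorChars : List String) : String :=
  -- " " * padLength : Python returns "" for non-positive counts, matching toNat's clamp
  let pad0 : String := String.ofList (List.replicate padLength.toNat ' ')
  (PySem.List.pyRange 0 numLines 1).foldl
    (fun separator i =>
      let separator :=
        if i < anchorIndex then separator ++ pad0 ++ (PySem.List.pyGet? separatorChars 0).getD ""
        else if i = anchorIndex then separator ++ pad0 ++ (PySem.List.pyGet? separatorChars 1).getD ""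
        else separator ++ pad0 ++ (PySem.List.pyGet? separatorChars 2).getD ""
      if i < numLines - 1 then separator ++ "\n" else separator)
    ""

-- ===== PORT B =====
def makeSeparator_alt (padLength : Int) (numLines : Int) (anchorIndex : Int) (separatorChars : List String) : String :=
  let pad0 : String := String.ofList (List.replicate padLength.toNat ' ')
  let before : Int := max 0 (min numLines anchorIndex)
  let hasAnchor : Bool := decide (0 ≤ anchorIndex ∧ anchorIndex < numLines)
  let after : Int := numLines - before - (if hasAnchor then 1 else 0)
  let lines : List String :=
    (if 0 < before then List.replicate before.toNat (pad0 ++ (PySem.List.pyGet? separatorChars 0).getD "") else [])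
    ++ (if hasAnchor then [pad0 ++ (PySem.List.pyGet? separatorChars 1).getD ""] else [])
    ++ (if 0 < after then List.replicate after.toNat (pad0 ++ (PySem.List.pyGet? separatorChars 2).getD "") else [])
  PySem.Str.join "\n" lines

-- ===== PRECONDITION & SPEC =====
-- Pre_ excludes exactly the inputs where Python A raises IndexError: a separator character is
-- actually selected by some line but missing from separatorChars (B raises on the same inputs).
def Pre_makeSeparator (padLength : Int) (numLines : Int) (anchorIndex : Int) (separatorChars : List String) : Prop :=
  ((0 < numLines ∧ 0 < anchorIndex) → 1 ≤ separatorChars.length) ∧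
  ((0 ≤ anchorIndex ∧ anchorIndex < numLines) → 2 ≤ separatorChars.length) ∧
  ((0 < numLines ∧ anchorIndex < numLines - 1) → 3 ≤ separatorChars.length)
instance (padLength : Int) (numLines : Int) (anchorIndex : Int) (separatorChars : List String) : Decidable (Pre_makeSeparator padLength numLines anchorIndex separatorChars) := by unfold Pre_makeSeparator; infer_instance

def pvWitness_makeSeparator : Int × Int × Int × List String := (1, 3, 1, [" ", "-", "|"])

def Spec_makeSeparator (padLength : Int) (numLines : Int) (anchorIndex : Int) (separatorChars : List String) (out : String) : Prop := out = makeSeparator_alt padLength numLines anchorIndex separatorChars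
instance (padLength : Int) (numLines : Int) (anchorIndex : Int) (separatorChars : List String) (out : String) : Decidable (Spec_makeSeparator padLength numLines anchorIndex separatorChars out) := by unfold Spec_makeSeparator; infer_instance

-- ===== CLAIM (what is proved, stated in full; the proofs are below) =====
def Claim_equal_makeSeparator : Prop := ∀ (padLength : Int) (numLines : Int) (anchorIndex : Int) (separatorChars : List String), Dom_makeSeparator padLength numLines anchorIndex separatorChars → Pre_makeSeparator padLength numLines anchorIndex separatorChars → Spec_makeSeparator padLength numLines anchorIndex separatorChars (makeSeparator padLength numLines anchorIndex separatorChars)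

-- ===== LEMMAS AND PROOFS =====

-- the string a single line of the separator consists of
def pvLine (pad0 g0 g1 g2 : String) (a i : Int) : String :=
  pad0 ++ (if i < a then g0 else if i = a then g1 else g2)

-- join on a snoc list, at the char level
theorem pv_charsJoin_snoc (sep x : List Char) (L : List (List Char)) :
    PySem.Chars.join sep (L ++ [x]) = (L.map (· ++ sep)).flatten ++ x := by
  induction L with
  | nil => simp [PySem.Chars.join_singleton]
  | cons h t ih =>
    rcases t with _ | ⟨y, ys⟩
    · rw [List.cons_append, List.nil_append, PySem.Chars.join_cons_cons]
      simp [PySem.Chars.join_singleton, List.append_assoc]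
    · simp only [List.cons_append]
      rw [PySem.Chars.join_cons_cons]
      simp only [List.cons_append] at ih
      rw [ih]
      simp [List.append_assoc]

-- toList of the newline-appending fold
theorem pv_toList_foldl (L : List String) (s : String) :
    (L.foldl (fun acc y => acc ++ (y ++ "\n")) s).toList
      = s.toList ++ (L.map (fun y => y.toList ++ "\n".toList)).flatten := by
  induction L generalizing s with
  | nil => simp
  | cons h t ih =>
    simp only [List.foldl_cons, List.map_cons, List.flatten_cons]
    rw [ih]
    simp [List.append_assoc]

-- join "\n" on a snoc list, at the string level
theorem pv_strJoin_snoc (L : List String) (x : String) :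
    PySem.Str.join "\n" (L ++ [x]) = L.foldl (fun acc y => acc ++ (y ++ "\n")) "" ++ x := by
  rw [← String.toList_inj]
  rw [PySem.Str.toList_join, List.map_append, List.map_singleton, pv_charsJoin_snoc,
    String.toList_append, pv_toList_foldl]
  simp [List.map_map, Function.comp_def]

-- the block-built line list is exactly the per-index line list
theorem pv_lines_eq (pad0 g0 g1 g2 : String) (a : Int) (m : Nat) :
    List.replicate (max 0 (min (m : Int) a)).toNat (pad0 ++ g0)
    ++ (if 0 ≤ a ∧ a < (m : Int) then [pad0 ++ g1] else [])
    ++ List.replicate ((m : Int) - max 0 (min (m : Int) a) - (if 0 ≤ a ∧ a < (m : Int) then 1 else 0)).toNat (pad0 ++ g2)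
    = (PySem.List.pyRange 0 (m : Int) 1).map (pvLine pad0 g0 g1 g2 a) := by
  induction m with
  | zero =>
    rw [show ((0:Nat):Int) = 0 from rfl, PySem.List.pyRange_one_eq_nil (le_refl 0)]
    simp only [if_neg (by omega : ¬(0 ≤ a ∧ a < (0:Int)))]
    rw [show (max 0 (min (0:Int) a)).toNat = 0 from by omega]
    rw [show ((0:Int) - max 0 (min (0:Int) a) - 0).toNat = 0 from by omega]
    simp
  | succ m ih =>
    rw [show ((m+1:Nat):Int) = (m:Int) + 1 from by push_cast; ring]
    rw [PySem.List.pyRange_one_succ_right (by positivity), List.map_append, ← ih]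
    rcases lt_trichotomy (m : Int) a with hlt | heq | hgt
    · simp only [if_neg (by omega : ¬(0 ≤ a ∧ a < (m:Int)+1)), if_neg (by omega : ¬(0 ≤ a ∧ a < (m:Int)))]
      rw [show (max 0 (min ((m:Int)+1) a)).toNat = m + 1 from by omega]
      rw [show (max 0 (min ((m:Int)) a)).toNat = m from by omega]
      rw [show ((m:Int)+1 - max 0 (min ((m:Int)+1) a) - 0).toNat = 0 from by omega]
      rw [show ((m:Int) - max 0 (min ((m:Int)) a) - 0).toNat = 0 from by omega]
      simp [List.replicate_succ', pvLine, hlt]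
    · simp only [if_pos (show (0 ≤ a ∧ a < (m:Int)+1) from by omega), if_neg (by omega : ¬(0 ≤ a ∧ a < (m:Int)))]
      rw [show (max 0 (min ((m:Int)+1) a)).toNat = m from by omega]
      rw [show (max 0 (min ((m:Int)) a)).toNat = m from by omega]
      rw [show ((m:Int)+1 - max 0 (min ((m:Int)+1) a) - 1).toNat = 0 from by omega]
      rw [show ((m:Int) - max 0 (min ((m:Int)) a) - 0).toNat = 0 from by omega]
      simp [pvLine, heq]
    · by_cases ha : 0 ≤ a
      · simp only [if_pos (show (0 ≤ a ∧ a < (m:Int)+1) from by omega), if_pos (show (0 ≤ a ∧ a < (m:Int)) from by omega)]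
        rw [show (max 0 (min ((m:Int)+1) a)).toNat = a.toNat from by omega]
        rw [show (max 0 (min ((m:Int)) a)).toNat = a.toNat from by omega]
        rw [show ((m:Int)+1 - max 0 (min ((m:Int)+1) a) - 1).toNat
            = ((m:Int) - max 0 (min ((m:Int)) a) - 1).toNat + 1 from by omega]
        simp [List.replicate_succ', pvLine, List.append_assoc]
        rw [if_neg (show ¬((m:Int) < a) from by omega), if_neg (show ¬((m:Int) = a) from by omega)]
      · simp only [if_neg (by omega : ¬(0 ≤ a ∧ a < (m:Int)+1)), if_neg (by omega : ¬(0 ≤ a ∧ a < (m:Int)))]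
        rw [show (max 0 (min ((m:Int)+1) a)).toNat = 0 from by omega]
        rw [show (max 0 (min ((m:Int)) a)).toNat = 0 from by omega]
        rw [show ((m:Int)+1 - max 0 (min ((m:Int)+1) a) - 0).toNat
            = ((m:Int) - max 0 (min ((m:Int)) a) - 0).toNat + 1 from by omega]
        simp [List.replicate_succ', pvLine]
        rw [if_neg (show ¬((m:Int) < a) from by omega), if_neg (show ¬((m:Int) = a) from by omega)]

-- the same, stated for a nonnegative Int bound
theorem pv_lines_eq' (pad0 g0 g1 g2 : String) (a n : Int) (hn : 0 ≤ n) :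
    List.replicate (max 0 (min n a)).toNat (pad0 ++ g0)
    ++ (if 0 ≤ a ∧ a < n then [pad0 ++ g1] else [])
    ++ List.replicate (n - max 0 (min n a) - (if 0 ≤ a ∧ a < n then 1 else 0)).toNat (pad0 ++ g2)
    = (PySem.List.pyRange 0 n 1).map (pvLine pad0 g0 g1 g2 a) := by
  have h := pv_lines_eq pad0 g0 g1 g2 a n.toNat
  rwa [Int.toNat_of_nonneg hn] at h

-- the selected line, with the accumulator factored out of the branches
theorem pv_last_step (F pad g0 g1 g2 : String) (a i : Int) :
    (if i < a then F ++ pad ++ g0 else if i = a then F ++ pad ++ g1 else F ++ pad ++ g2)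
      = F ++ pvLine pad g0 g1 g2 a i := by
  unfold pvLine
  split_ifs <;> simp [String.append_assoc]

-- a positive-guarded replicate is just a replicate
theorem pv_collapse {α : Type} (b : Int) (x : α) :
    (if 0 < b then List.replicate b.toNat x else []) = List.replicate b.toNat x := by
  split_ifs with h
  · rfl
  · rw [Int.toNat_of_nonpos (by omega)]
    rfl

-- ===== VERDICT (by name: the statement is the Claim_ definition above) =====
theorem makeSeparator_spec : Claim_equal_makeSeparator := by
  intro p n a cs _ _
  unfold Spec_makeSeparator makeSeparator makeSeparator_alt
  simp only [pv_collapse, decide_eq_true_eq]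
  by_cases hn : n ≤ 0
  · rw [PySem.List.pyRange_one_eq_nil hn]
    rw [show (max 0 (min n a)).toNat = 0 from by omega]
    simp only [if_neg (show ¬(0 ≤ a ∧ a < n) from by omega)]
    rw [show (n - max 0 (min n a) - 0).toNat = 0 from by omega]
    simp [PySem.Str.join, PySem.Chars.join, List.intercalate]
  · push Not at hn
    rw [pv_lines_eq' _ _ _ _ a n (by omega)]
    obtain ⟨k, hk⟩ : ∃ k : Nat, n = (k : Int) + 1 := ⟨(n - 1).toNat, by omega⟩
    subst hk
    rw [PySem.List.pyRange_one_succ_right (by positivity), List.map_append,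
      List.map_singleton, pv_strJoin_snoc, List.foldl_append, List.foldl_cons, List.foldl_nil]
    rw [PySem.List.foldl_congr_mem _ _
      (fun acc i => acc ++ (pvLine (String.ofList (List.replicate p.toNat ' '))
        ((PySem.List.pyGet? cs 0).getD "") ((PySem.List.pyGet? cs 1).getD "")
        ((PySem.List.pyGet? cs 2).getD "") a i ++ "\n")) ""
      (by
        intro acc i hi
        have hmem := PySem.List.mem_pyRange_one.mp hi
        rw [if_pos (show i < (k:Int) + 1 - 1 from by omega), pv_last_step,
          String.append_assoc])]
    rw [if_neg (show ¬((k:Int) < (k:Int) + 1 - 1) from by omega), pv_last_step, List.foldl_map]
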